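-- pv_equiv track=rewrite | github.com/shuaizengMU/MachineLearning | digitalRecognition/svmTrain_2_bsl.py | addColGreatN
-- ===== SOURCE A (Python) =====
-- def addColGreatN(xList, listLen, N):
-- 	newFeatureList = []
-- 	for idx in range(listLen):
-- 		tempList = xList[idx]
-- 		newFeature = [0 for i in range(28)]
-- 		num = 0
-- 		for i in range(len(tempList)):
-- 			if tempList[i] > N:
-- 				newFeature[i%28] += 1;
-- 		newFeatureList.append(newFeature)
-- 	return newFeatureList
-- ===== SOURCE B (Python) =====
-- def addColGreatN(xList, listLen, N):
--     # Column-major: for each of the first listLen rows, count qualifying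
--     # elements per column c by a strided scan over positions c, c+28, c+56, ...
--     newFeatureList = []
--     for tempList in xList[:max(listLen, 0)]:
--         newFeature = []
--         for c in range(28):
--             cnt = 0
--             for j in range(c, len(tempList), 28):
--                 if tempList[j] > N:
--                     cnt += 1
--             newFeature.append(cnt)
--         newFeatureList.append(newFeature)
--     return newFeatureList
-- ===== Notes on version B (the rewrite author's own statement) =====
-- stated objective: alternative
-- what changed: Replaces A's single element-order pass that increments newFeature[i%28] with an inverted column-major loop: for each of the 28 columns a strided scan over positions c, c+28, ... counts qualifying elements.
import Mathlib
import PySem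

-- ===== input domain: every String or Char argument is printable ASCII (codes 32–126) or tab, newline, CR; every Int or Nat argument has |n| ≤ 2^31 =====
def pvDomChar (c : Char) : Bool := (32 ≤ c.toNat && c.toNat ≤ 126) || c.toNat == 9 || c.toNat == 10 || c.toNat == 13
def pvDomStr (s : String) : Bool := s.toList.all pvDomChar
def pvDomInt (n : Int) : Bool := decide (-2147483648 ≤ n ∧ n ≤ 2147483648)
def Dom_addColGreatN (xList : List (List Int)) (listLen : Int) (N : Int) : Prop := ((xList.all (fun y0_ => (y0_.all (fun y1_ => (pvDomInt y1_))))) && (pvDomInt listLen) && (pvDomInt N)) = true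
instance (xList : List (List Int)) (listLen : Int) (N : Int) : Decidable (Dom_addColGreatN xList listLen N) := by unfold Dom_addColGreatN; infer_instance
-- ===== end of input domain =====

-- B inverts the loop nesting (column-major strided counting per column) instead of A's
-- single element-order accumulation pass; objective: alternative decomposition, same cost.

-- ===== PORT A =====
-- inner loop of A: for i in range(len(tempList)): if tempList[i] > N: newFeature[i%28] += 1
-- (i and i%28 are always in range here, so getD/set are exact)
def pvRowA (tempList : List Int) (N : Int) : List Int :=
  (List.range tempList.length).foldl
    (fun nf i => if tempList.getD i 0 > N then nf.set (i % 28) (nf.getD (i % 28) 0 + 1) else nf)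
    (List.replicate 28 0)

def addColGreatN (xList : List (List Int)) (listLen : Int) (N : Int) : List (List Int) :=
  -- range(listLen) is empty for negative listLen, hence listLen.toNat;
  -- xList[idx] is PySem.List.pyGetD (always in range on Pre_, where A returns)
  (List.range listLen.toNat).foldl
    (fun acc (idx : Nat) => acc ++ [pvRowA (PySem.List.pyGetD xList (Int.ofNat idx) []) N]) []

-- ===== PORT B =====
-- inner j-loop of B: cnt over range(c, len(tempList), 28)
def pvColCountB (tempList : List Int) (N : Int) (c : Int) : Int :=
  (PySem.List.pyRange c tempList.length 28).foldl
    (fun cnt j => if PySem.List.pyGetD tempList j 0 > N then cnt + 1 else cnt) 0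

def addColGreatN_alt (xList : List (List Int)) (listLen : Int) (N : Int) : List (List Int) :=
  -- xList[:max(listLen, 0)] = take (max listLen 0).toNat = take listLen.toNat
  (xList.take listLen.toNat).map
    (fun tempList => (List.range 28).map (fun (c : Nat) => pvColCountB tempList N (Int.ofNat c)))

-- ===== PRECONDITION & SPEC =====
-- A raises IndexError on xList[idx] when listLen > len(xList); exactly those inputs are excluded.
def Pre_addColGreatN (xList : List (List Int)) (listLen : Int) (N : Int) : Prop :=
  listLen ≤ (xList.length : Int)
instance (xList : List (List Int)) (listLen : Int) (N : Int) : Decidable (Pre_addColGreatN xList listLen N) := by unfold Pre_addColGreatN; infer_instance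

def pvWitness_addColGreatN : List (List Int) × Int × Int := ([[1, 2], [3]], 2, 1)

def Spec_addColGreatN (xList : List (List Int)) (listLen : Int) (N : Int) (out : List (List Int)) : Prop := out = addColGreatN_alt xList listLen N
instance (xList : List (List Int)) (listLen : Int) (N : Int) (out : List (List Int)) : Decidable (Spec_addColGreatN xList listLen N out) := by unfold Spec_addColGreatN; infer_instance

-- ===== CLAIM (what is proved, stated in full; the proofs are below) =====
def Claim_equal_addColGreatN : Prop := ∀ (xList : List (List Int)) (listLen : Int) (N : Int), Dom_addColGreatN xList listLen N → Pre_addColGreatN xList listLen N → Spec_addColGreatN xList listLen N (addColGreatN xList listLen N)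

-- ===== LEMMAS AND PROOFS =====

-- number of stride-28 positions c, c+28, … below L
def pvCountK (L c : Nat) : Nat := (L - c + 27) / 28

theorem pvPyRange28 (L c : Nat) :
    PySem.List.pyRange ((c : Nat) : Int) ((L : Nat) : Int) 28 =
      (List.range (pvCountK L c)).map (fun (k : Nat) => ((c : Nat) : Int) + 28 * (k : Int)) := by
  rw [PySem.List.pyRange_of_pos _ _ (by norm_num)]
  have h : (if ((c : Nat) : Int) < ((L : Nat) : Int) then ((((L : Nat) : Int) - ((c : Nat) : Int) + 28 - 1) / 28).toNat else 0) = pvCountK L c := by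
    unfold pvCountK
    split <;> omega
  rw [h]

theorem pvCountStrided (p : Nat → Bool) (L c : Nat) (hc : c < 28) :
    List.countP (fun k => p (c + 28 * k)) (List.range (pvCountK L c)) =
      List.countP (fun i => (i % 28 == c) && p i) (List.range L) := by
  induction L with
  | zero =>
      have h0 : pvCountK 0 c = 0 := by unfold pvCountK; omega
      simp [h0]
  | succ L ih =>
      rw [List.range_succ, List.countP_append]
      by_cases hL : L % 28 = c
      · have h1 : pvCountK (L + 1) c = pvCountK L c + 1 := by unfold pvCountK; omega
        have h2 : c + 28 * pvCountK L c = L := by unfold pvCountK; omega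
        rw [h1, List.range_succ, List.countP_append, ih]
        simp [h2, hL]
      · have h1 : pvCountK (L + 1) c = pvCountK L c := by unfold pvCountK; omega
        rw [h1, ih]
        simp [hL]

theorem pvColCountB_eq (tempList : List Int) (N : Int) (c : Nat) (hc : c < 28) :
    pvColCountB tempList N (Int.ofNat c) =
      (List.countP (fun i => (i % 28 == c) && decide (tempList.getD i 0 > N))
        (List.range tempList.length) : Int) := by
  unfold pvColCountB
  rw [Int.ofNat_eq_natCast, pvPyRange28, List.foldl_map,
    PySem.List.foldl_ite_add_one (fun k : Nat => PySem.List.pyGetD tempList ((c : Int) + 28 * (k : Int)) 0 > N)]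
  have hcnt : List.countP (fun k : Nat => decide (PySem.List.pyGetD tempList ((c : Int) + 28 * (k : Int)) 0 > N))
      (List.range (pvCountK tempList.length c)) =
      List.countP (fun k : Nat => decide (tempList.getD (c + 28 * k) 0 > N))
      (List.range (pvCountK tempList.length c)) := by
    apply List.countP_congr
    intro k _
    rw [PySem.List.pyGetD_of_nonneg _ _ (by positivity)]
    have : ((c : Int) + 28 * (k : Int)).toNat = c + 28 * k := by omega
    rw [this]
  rw [hcnt, pvCountStrided (fun i => decide (tempList.getD i 0 > N)) tempList.length c hc]
  simp

-- characterisation of A's inner accumulation pass as per-column counts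
theorem pvRowA_eq_counts (tempList : List Int) (N : Int) (m : Nat) :
    (List.range m).foldl
      (fun nf i => if tempList.getD i 0 > N then nf.set (i % 28) (nf.getD (i % 28) 0 + 1) else nf)
      (List.replicate 28 0) =
    (List.range 28).map (fun c =>
      (List.countP (fun i => (i % 28 == c) && decide (tempList.getD i 0 > N)) (List.range m) : Int)) := by
  induction m with
  | zero =>
      apply List.ext_getElem (by simp)
      intro k h1 h2
      simp
  | succ m ih =>
      rw [List.range_succ, List.foldl_append, ih]
      simp only [List.foldl_cons, List.foldl_nil]
      by_cases hp : tempList.getD m 0 > N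
      · have hp' : N < tempList[m]?.getD 0 := by simpa [List.getD] using hp
        rw [if_pos hp]
        have hm : m % 28 < 28 := by omega
        have hgetD : ((List.range 28).map (fun c =>
            (List.countP (fun i => (i % 28 == c) && decide (tempList.getD i 0 > N)) (List.range m) : Int))).getD (m % 28) 0 =
            (List.countP (fun i => (i % 28 == m % 28) && decide (tempList.getD i 0 > N)) (List.range m) : Int) := by
          rw [List.getD_eq_getElem _ _ (by simpa using hm)]
          simp
        rw [hgetD]
        apply List.ext_getElem (by simp)
        intro k h1 h2
        have hk : k < 28 := by simpa using h1
        rw [List.getElem_set]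
        by_cases hke : m % 28 = k
        · rw [if_pos hke, List.getElem_map, List.getElem_range]
          subst hke
          simp [List.countP_append, List.getD, hp']
        · rw [if_neg hke]
          simp only [List.getElem_map, List.getElem_range]
          simp [List.countP_append, List.getD, hke]
      · have hp' : ¬ (N < tempList[m]?.getD 0) := by simpa [List.getD] using hp
        rw [if_neg hp]
        apply List.map_congr_left
        intro c _
        simp [List.countP_append, List.getD, hp']

theorem pvRow_eq (tempList : List Int) (N : Int) :
    pvRowA tempList N = (List.range 28).map (fun (c : Nat) => pvColCountB tempList N (Int.ofNat c)) := by
  unfold pvRowA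
  rw [pvRowA_eq_counts]
  apply List.map_congr_left
  intro c hc
  rw [pvColCountB_eq tempList N c (List.mem_range.mp hc)]

theorem pvOuter (f : List Int → List Int) (xs : List (List Int)) (n : Nat) (hn : n ≤ xs.length) :
    (List.range n).foldl (fun acc (idx : Nat) => acc ++ [f (PySem.List.pyGetD xs (Int.ofNat idx) [])]) [] =
      (xs.take n).map f := by
  induction n with
  | zero => simp
  | succ n ih =>
      rw [List.range_succ, List.foldl_append, ih (by omega)]
      simp only [List.foldl_cons, List.foldl_nil]
      have hlt : n < xs.length := by omega
      rw [List.take_add_one, List.map_append]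
      congr 1
      rw [Int.ofNat_eq_natCast, PySem.List.pyGetD_of_nonneg _ _ (by positivity)]
      simp [List.getElem?_eq_getElem hlt]

-- ===== VERDICT (by name: the statement is the Claim_ definition above) =====
theorem addColGreatN_spec : Claim_equal_addColGreatN := by
  intro xList listLen N _ hpre
  unfold Spec_addColGreatN addColGreatN addColGreatN_alt
  have hn : listLen.toNat ≤ xList.length := by
    unfold Pre_addColGreatN at hpre; omega
  rw [pvOuter (fun row => pvRowA row N) xList listLen.toNat hn]
  apply List.map_congr_left
  intro row _
  exact pvRow_eq row N
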